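-- pv_equiv track=rewrite | github.com/mfish324/genzjobs | scraper/classification.py | analyze_description_signals
-- ===== SOURCE A (Python) =====
-- from typing import List, Optional, Dict, Literal, Tuple
-- from enum import Enum
--
-- class ExperienceLevel(str, Enum):
--     ENTRY = "ENTRY"
--     MID = "MID"
--     SENIOR = "SENIOR"
--     EXECUTIVE = "EXECUTIVE"
--
-- DESCRIPTION_SIGNALS = {
--     "entry": [
--         'no experience required', 'no experience necessary', 'no experience needed',
--         'no prior experience', 'entry level position', 'entry-level position',
--         'recent graduate', 'fresh graduate', 'will train', 'training provided',
--         'learn on the job'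
--     ],
--     "mid": [
--         'manage a team', 'lead a team', 'team management',
--         '2-3 years', '3-5 years', 'proven track record'
--     ],
--     "senior": [
--         'report to the ceo', 'report to the cto', 'report to the cfo',
--         'reports to ceo', 'reports to cto', 'report directly to',
--         'extensive experience', 'expert level', 'deep expertise',
--         '7+ years', '8+ years', '10+ years'
--     ],
--     "executive": [
--         'board of directors', 'c-suite', 'executive team',
--         'p&l responsibility', 'profit and loss', 'company strategy',
--         'organizational strategy', '15+ years', '20+ years'
--     ]
-- }
--
-- def analyze_description_signals(description: str) -> Tuple[Optional[ExperienceLevel], List[str]]: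
--     """Analyze description for experience level signals"""
--     lower_desc = description.lower()
--     matches = []
--     level = None
--
--     # Check in order of specificity
--     for signal in DESCRIPTION_SIGNALS["executive"]:
--         if signal in lower_desc:
--             matches.append(signal)
--             level = ExperienceLevel.EXECUTIVE
--
--     if not level:
--         for signal in DESCRIPTION_SIGNALS["senior"]:
--             if signal in lower_desc:
--                 matches.append(signal)
--                 level = ExperienceLevel.SENIOR
--
--     if not level:
--         for signal in DESCRIPTION_SIGNALS["entry"]:
--             if signal in lower_desc:
--                 matches.append(signal)
--                 level = ExperienceLevel.ENTRY
--
--     if not level: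
--         for signal in DESCRIPTION_SIGNALS["mid"]:
--             if signal in lower_desc:
--                 matches.append(signal)
--                 level = ExperienceLevel.MID
--
--     return level, matches
-- ===== SOURCE B (Python) =====
-- from typing import List, Optional, Tuple
-- from enum import Enum
--
-- class ExperienceLevel(str, Enum):
--     ENTRY = "ENTRY"
--     MID = "MID"
--     SENIOR = "SENIOR"
--     EXECUTIVE = "EXECUTIVE"
--
-- DESCRIPTION_SIGNALS = {
--     "entry": [
--         'no experience required', 'no experience necessary', 'no experience needed',
--         'no prior experience', 'entry level position', 'entry-level position',
--         'recent graduate', 'fresh graduate', 'will train', 'training provided',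
--         'learn on the job'
--     ],
--     "mid": [
--         'manage a team', 'lead a team', 'team management',
--         '2-3 years', '3-5 years', 'proven track record'
--     ],
--     "senior": [
--         'report to the ceo', 'report to the cto', 'report to the cfo',
--         'reports to ceo', 'reports to cto', 'report directly to',
--         'extensive experience', 'expert level', 'deep expertise',
--         '7+ years', '8+ years', '10+ years'
--     ],
--     "executive": [
--         'board of directors', 'c-suite', 'executive team',
--         'p&l responsibility', 'profit and loss', 'company strategy',
--         'organizational strategy', '15+ years', '20+ years'
--     ]
-- }
--
-- # One flat list of (priority_rank, signal), rank 0 = most specific category.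
-- _RANKED = [(rank, sig)
--            for rank, key in enumerate(("executive", "senior", "entry", "mid"))
--            for sig in DESCRIPTION_SIGNALS[key]]
-- _LEVELS = [ExperienceLevel.EXECUTIVE, ExperienceLevel.SENIOR,
--            ExperienceLevel.ENTRY, ExperienceLevel.MID]
--
-- def analyze_description_signals(description: str) -> Tuple[Optional[ExperienceLevel], List[str]]:
--     """Analyze description for experience level signals"""
--     lower_desc = description.lower()
--     hits = [(r, s) for r, s in _RANKED if s in lower_desc]
--     if not hits:
--         return None, []
--     best = min(r for r, _ in hits)
--     return _LEVELS[best], [s for r, s in hits if r == best]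
-- ===== Notes on version B (the rewrite author's own statement) =====
-- stated objective: alternative
-- what changed: B flattens all signals into one (priority-rank, signal) list, filters it once against the lowered description, and selects the minimum rank among the hits (argmin selection) instead of A's four sequential category loops guarded by mutable level state.
import Mathlib
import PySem

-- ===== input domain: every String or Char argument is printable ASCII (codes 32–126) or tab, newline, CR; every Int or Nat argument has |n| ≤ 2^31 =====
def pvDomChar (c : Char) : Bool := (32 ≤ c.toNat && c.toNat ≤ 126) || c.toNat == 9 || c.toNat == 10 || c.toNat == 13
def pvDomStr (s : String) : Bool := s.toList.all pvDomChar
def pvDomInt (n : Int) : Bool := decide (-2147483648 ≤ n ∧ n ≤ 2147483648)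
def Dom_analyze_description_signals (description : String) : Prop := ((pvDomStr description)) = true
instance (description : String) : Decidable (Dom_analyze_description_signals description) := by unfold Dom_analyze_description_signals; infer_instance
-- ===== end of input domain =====

-- B replaces A's four staged category loops (mutable level state) by a single filter over
-- one flat (rank, signal) list followed by min-rank (argmin) selection; alternative algorithm, same behaviour.


-- shared module constant DESCRIPTION_SIGNALS (the four keyword lists)
def pvEntrySignals : List String :=
  ["no experience required", "no experience necessary", "no experience needed",
   "no prior experience", "entry level position", "entry-level position",
   "recent graduate", "fresh graduate", "will train", "training provided",
   "learn on the job"]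
def pvMidSignals : List String :=
  ["manage a team", "lead a team", "team management",
   "2-3 years", "3-5 years", "proven track record"]
def pvSeniorSignals : List String :=
  ["report to the ceo", "report to the cto", "report to the cfo",
   "reports to ceo", "reports to cto", "report directly to",
   "extensive experience", "expert level", "deep expertise",
   "7+ years", "8+ years", "10+ years"]
def pvExecutiveSignals : List String :=
  ["board of directors", "c-suite", "executive team",
   "p&l responsibility", "profit and loss", "company strategy",
   "organizational strategy", "15+ years", "20+ years"]

-- ===== PORT A =====
-- one of A's 'for signal in …: if signal in lower_desc: matches.append; level = lvl' loops
def pvLoopA (lower_desc : String) (lvl : String) (sigs : List String)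
    (st : List String × Option String) : List String × Option String :=
  sigs.foldl (fun st s => if PySem.Str.isIn s lower_desc then (st.1 ++ [s], some lvl) else st) st

def analyze_description_signals (description : String) : Option String × List String :=
  let lower_desc := PySem.Str.lower description
  let st := pvLoopA lower_desc "EXECUTIVE" pvExecutiveSignals ([], none)
  let st := if st.2 = none then pvLoopA lower_desc "SENIOR" pvSeniorSignals st else st
  let st := if st.2 = none then pvLoopA lower_desc "ENTRY" pvEntrySignals st else st
  let st := if st.2 = none then pvLoopA lower_desc "MID" pvMidSignals st else st
  (st.2, st.1)

-- ===== PORT B =====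
-- _RANKED = [(rank, sig) for rank, key in enumerate(("executive","senior","entry","mid")) for sig in DESCRIPTION_SIGNALS[key]]
def pvRankedSignals : List (Int × String) :=
  (PySem.List.enumerate [pvExecutiveSignals, pvSeniorSignals, pvEntrySignals, pvMidSignals]).flatMap
    (fun rs => rs.2.map (fun s => (rs.1, s)))
def pvLevels : List String := ["EXECUTIVE", "SENIOR", "ENTRY", "MID"]

-- hits = matched (rank, signal) pairs; 'if not hits' is the none branch of min?;
-- best = min rank; result = _LEVELS[best] and the signals whose rank is best
def analyze_description_signals_alt (description : String) : Option String × List String :=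
  let lower_desc := PySem.Str.lower description
  let hits := pvRankedSignals.filter (fun p => PySem.Str.isIn p.2 lower_desc)
  match (hits.map Prod.fst).min? with
  | none => (none, [])
  | some best => (PySem.List.pyGet? pvLevels best, (hits.filter (fun p => p.1 = best)).map Prod.snd)

-- ===== PRECONDITION & SPEC =====
def Spec_analyze_description_signals (description : String) (out : Option String × List String) : Prop := out = analyze_description_signals_alt description
instance (description : String) (out : Option String × List String) : Decidable (Spec_analyze_description_signals description out) := by unfold Spec_analyze_description_signals; infer_instance

-- ===== CLAIM (what is proved, stated in full; the proofs are below) =====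
def Claim_equal_analyze_description_signals : Prop := ∀ (description : String), Dom_analyze_description_signals description → Spec_analyze_description_signals description (analyze_description_signals description)

-- ===== LEMMAS AND PROOFS =====
-- both ports compute pvChain: the first category (by priority) whose filtered match list is non-empty
def pvCat (low : String) (sigs : List String) : List String := sigs.filter (fun s => PySem.Str.isIn s low)
def pvChain (low : String) : Option String × List String :=
  if pvCat low pvExecutiveSignals ≠ [] then (some "EXECUTIVE", pvCat low pvExecutiveSignals)
  else if pvCat low pvSeniorSignals ≠ [] then (some "SENIOR", pvCat low pvSeniorSignals)
  else if pvCat low pvEntrySignals ≠ [] then (some "ENTRY", pvCat low pvEntrySignals)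
  else if pvCat low pvMidSignals ≠ [] then (some "MID", pvCat low pvMidSignals)
  else (none, [])

theorem pvLoopA_eq (lower_desc lvl : String) (sigs : List String)
    (acc : List String) (o : Option String) :
    pvLoopA lower_desc lvl sigs (acc, o) =
      (acc ++ sigs.filter (fun s => PySem.Str.isIn s lower_desc),
       if sigs.filter (fun s => PySem.Str.isIn s lower_desc) = [] then o else some lvl) := by
  induction sigs generalizing acc o with
  | nil => simp [pvLoopA]
  | cons hd tl ih =>
    simp only [pvLoopA, List.foldl_cons] at ih ⊢
    by_cases h : PySem.Str.isIn hd lower_desc = true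
    · rw [if_pos h, ih, List.filter_cons, if_pos h,
        if_neg (List.cons_ne_nil hd (tl.filter (fun s => PySem.Str.isIn s lower_desc)))]
      simp
    · rw [if_neg h, ih, List.filter_cons, if_neg h]

theorem A_char (d : String) : analyze_description_signals d = pvChain (PySem.Str.lower d) := by
  unfold analyze_description_signals pvChain pvCat
  simp only [pvLoopA_eq, List.nil_append]
  split_ifs <;> simp_all [pvLoopA_eq, -List.filter_eq_nil_iff]

theorem pvRanked_flat : pvRankedSignals =
    pvExecutiveSignals.map (fun s => ((0:Int), s)) ++ pvSeniorSignals.map (fun s => ((1:Int), s))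
    ++ pvEntrySignals.map (fun s => ((2:Int), s)) ++ pvMidSignals.map (fun s => ((3:Int), s)) := by
  simp [pvRankedSignals, PySem.List.enumerate]

theorem min?_of_mem (l : List Int) (a : Int) (h : a ∈ l) (h2 : ∀ x ∈ l, a ≤ x) : l.min? = some a :=
  List.min?_eq_some_iff.mpr ⟨h, h2⟩

-- the minimum rank among the hits is the rank of the first non-empty category
theorem pvSel0 (E S N M : List String) (hE : E ≠ []) :
    ((E.map (fun s => ((0:Int),s)) ++ S.map (fun s => ((1:Int),s)) ++ N.map (fun s => ((2:Int),s)) ++ M.map (fun s => ((3:Int),s))).map Prod.fst).min? = some 0 := by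
  apply min?_of_mem
  · simp [List.mem_map, List.mem_append]
    exact List.exists_mem_of_ne_nil _ hE
  · intro b hb
    simp [List.mem_map, List.mem_append] at hb
    rcases hb with ⟨_,h⟩|⟨_,h⟩|⟨_,h⟩|⟨_,h⟩ <;> omega

theorem pvSel1 (S N M : List String) (hS : S ≠ []) :
    ((S.map (fun s => ((1:Int),s)) ++ N.map (fun s => ((2:Int),s)) ++ M.map (fun s => ((3:Int),s))).map Prod.fst).min? = some 1 := by
  apply min?_of_mem
  · simp [List.mem_map, List.mem_append]
    exact List.exists_mem_of_ne_nil _ hS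
  · intro b hb
    simp [List.mem_map, List.mem_append] at hb
    rcases hb with ⟨_,h⟩|⟨_,h⟩|⟨_,h⟩ <;> omega

theorem pvSel2 (N M : List String) (hN : N ≠ []) :
    ((N.map (fun s => ((2:Int),s)) ++ M.map (fun s => ((3:Int),s))).map Prod.fst).min? = some 2 := by
  apply min?_of_mem
  · simp [List.mem_append]
    exact hN
  · intro b hb
    simp [List.mem_append] at hb
    rcases hb with ⟨_,h⟩|⟨_,h⟩ <;> omega

theorem pvSel3 (M : List String) (hM : M ≠ []) :
    ((M.map (fun s => ((3:Int),s))).map Prod.fst).min? = some 3 := by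
  apply min?_of_mem
  · simp
    exact hM
  · intro b hb
    simp at hb
    omega

theorem B_char (d : String) : analyze_description_signals_alt d = pvChain (PySem.Str.lower d) := by
  unfold analyze_description_signals_alt pvChain pvCat
  simp only [pvRanked_flat, List.filter_append, List.filter_map, Function.comp_def]
  split_ifs with hE hS hN hM <;> simp only [ne_eq, not_not] at *
  · rw [pvSel0 _ _ _ _ hE]
    simp [pvLevels, PySem.List.pyGet?, PySem.List.pyIdx?]
  · rw [hE]
    simp only [List.map_nil, List.nil_append]
    rw [pvSel1 _ _ _ hS]
    simp [pvLevels, PySem.List.pyGet?, PySem.List.pyIdx?]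
  · rw [hE, hS]
    simp only [List.map_nil, List.nil_append]
    rw [pvSel2 _ _ hN]
    simp [pvLevels, PySem.List.pyGet?, PySem.List.pyIdx?]
  · rw [hE, hS, hN]
    simp only [List.map_nil, List.nil_append]
    rw [pvSel3 _ hM]
    simp [pvLevels, PySem.List.pyGet?, PySem.List.pyIdx?]
  · rw [hE, hS, hN, hM]
    simp

-- ===== VERDICT (by name: the statement is the Claim_ definition above) =====
theorem analyze_description_signals_spec : Claim_equal_analyze_description_signals := by
  intro description _
  unfold Spec_analyze_description_signals
  rw [A_char, B_char]
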